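-- pv_equiv track=rewrite | github.com/antoineinn/Project-ULB | INFO-F106/Part4/setFunctions.py | exists_set
-- ===== SOURCE A (Python) =====
-- def is_set(card_trio):
--     """ Verifies that a 3-tuple of cards is actually a set. Pre-condition: card_trio is a 3-tuple of cards. Return True if the 3-tuple of cards is a set, False otherwise. """
--     if None in card_trio:
--         return False
--
--     for i in range(4):
--         # The function's execution is stopped as soon as the condition to be a set is not met by one property
--         if ((card_trio[0][i] + card_trio[1][i] + card_trio[2][i]) % 3) != 0:
--             return False
--
--     return True
--
-- def exists_set(card_list):
--     """ Return True if there exist at least one set in card_list, False otherwise. Most efficient version, with nested loops, stopping as soon as the first set is detected. """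
--     # With more than 21 cards in the card_list, the existence of a set has been theoretically proven.
--     if len(card_list) >= 21:
--         return True
--
--     for i in range(len(card_list)-2):
--         for j in range(i+1,len(card_list)-1):
--             for k in range(j+1,len(card_list)):
--                 if is_set([card_list[i],card_list[j],card_list[k]]):
--                     return True
--     return False
-- ===== SOURCE B (Python) =====
-- def exists_set(card_list):
--     # With more than 21 cards in the card_list, the existence of a set has been theoretically proven.
--     if len(card_list) >= 21:
--         return True
--     if len(card_list) < 3:
--         return False
--     keys = [(c[0] % 3, c[1] % 3, c[2] % 3, c[3] % 3) for c in card_list]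
--     n = len(keys)
--     for i in range(n):
--         for j in range(i + 1, n):
--             a, b = keys[i], keys[j]
--             need = ((-(a[0] + b[0])) % 3, (-(a[1] + b[1])) % 3,
--                     (-(a[2] + b[2])) % 3, (-(a[3] + b[3])) % 3)
--             for k, kk in enumerate(keys):
--                 if kk == need and k != i and k != j:
--                     return True
--     return False
-- ===== Notes on version B (the rewrite author's own statement) =====
-- stated objective: alternative
-- what changed: B normalizes each card once to its mod-3 key, then for every pair of cards computes the unique completing key coordinate-wise and searches for a distinct card holding it, instead of testing every triple with is_set.
-- outside the precondition, e.g. on exists_set([(0, 0, 0, 0), (0, 0, 0, 0), (0, 0, 0, 0), (1,)]): A returns True, B raises IndexError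
import Mathlib
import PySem

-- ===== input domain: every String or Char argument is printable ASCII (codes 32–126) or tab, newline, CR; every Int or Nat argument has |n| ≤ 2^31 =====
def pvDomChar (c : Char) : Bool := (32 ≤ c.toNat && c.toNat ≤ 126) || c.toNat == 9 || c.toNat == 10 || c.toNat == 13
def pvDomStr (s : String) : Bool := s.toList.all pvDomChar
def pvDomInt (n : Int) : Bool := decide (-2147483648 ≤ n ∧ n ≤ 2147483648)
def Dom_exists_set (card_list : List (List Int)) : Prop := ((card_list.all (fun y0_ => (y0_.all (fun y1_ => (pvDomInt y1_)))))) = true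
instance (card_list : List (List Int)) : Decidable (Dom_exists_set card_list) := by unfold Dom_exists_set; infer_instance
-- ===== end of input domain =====

-- B replaces A's triple loop by: normalize every card once to its mod-3 key, then for each pair
-- compute the unique completing key and scan for a distinct card holding it (objective: alternative).

-- ===== PORT A =====
-- is_set on a trio of cards (the Python 'None in card_trio' branch is unreachable here: the trio is
-- always built from card_list entries, which are lists). Indexing card[i] raises IndexError in Python
-- on a card shorter than 4; those inputs are excluded by Pre_, so 'getD t 0' is exact on the admitted domain.
def isSetA (a b c : List Int) : Bool :=
  (List.range 4).all fun t =>
    PySem.Int.mod (a.getD t 0 + b.getD t 0 + c.getD t 0) 3 == 0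

def exists_set (card_list : List (List Int)) : Bool :=
  if 21 ≤ card_list.length then true
  else
    (List.range (card_list.length - 2)).any fun i =>
      (List.range' (i+1) (card_list.length - 1 - (i+1))).any fun j =>
        (List.range' (j+1) (card_list.length - (j+1))).any fun k =>
          isSetA (card_list.getD i []) (card_list.getD j []) (card_list.getD k [])

-- ===== PORT B =====
-- mod-3 key of a card (c[0]%3, c[1]%3, c[2]%3, c[3]%3); exact on Pre_ as above.
def keyOf (c : List Int) : Int × Int × Int × Int :=
  (PySem.Int.mod (c.getD 0 0) 3, PySem.Int.mod (c.getD 1 0) 3,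
   PySem.Int.mod (c.getD 2 0) 3, PySem.Int.mod (c.getD 3 0) 3)

-- the unique key completing a pair of keys to a set, coordinate-wise (-(a+b)) % 3
def needKey (a b : Int × Int × Int × Int) : Int × Int × Int × Int :=
  (PySem.Int.mod (-(a.1 + b.1)) 3, PySem.Int.mod (-(a.2.1 + b.2.1)) 3,
   PySem.Int.mod (-(a.2.2.1 + b.2.2.1)) 3, PySem.Int.mod (-(a.2.2.2 + b.2.2.2)) 3)

-- the pair-scan over the precomputed key list (Python's i/j/enumerate loops)
def altScan (keys : List (Int × Int × Int × Int)) : Bool :=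
  (List.range keys.length).any fun i =>
    (List.range' (i+1) (keys.length - (i+1))).any fun j =>
      (PySem.List.enumerate keys).any fun p =>
        p.2 == needKey (keys.getD i (0,0,0,0)) (keys.getD j (0,0,0,0)) &&
          decide (p.1 ≠ (i : Int)) && decide (p.1 ≠ (j : Int))

def exists_set_alt (card_list : List (List Int)) : Bool :=
  if 21 ≤ card_list.length then true
  else if card_list.length < 3 then false
  else altScan (card_list.map keyOf)

-- ===== PRECONDITION & SPEC =====
-- Pre_ excludes lists of 3 to 20 cards containing a card with fewer than 4 properties: Python A raises
-- IndexError on them unless a set among earlier cards happens to be found first (and B raises there).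
def Pre_exists_set (card_list : List (List Int)) : Prop :=
  21 ≤ card_list.length ∨ card_list.length < 3 ∨ ∀ c ∈ card_list, 4 ≤ c.length
instance (card_list : List (List Int)) : Decidable (Pre_exists_set card_list) := by
  unfold Pre_exists_set; infer_instance

def pvWitness_exists_set : List (List Int) := [[0,0,0,0],[1,1,1,1],[2,2,2,2]]

def Spec_exists_set (card_list : List (List Int)) (out : Bool) : Prop := out = exists_set_alt card_list
instance (card_list : List (List Int)) (out : Bool) : Decidable (Spec_exists_set card_list out) := by
  unfold Spec_exists_set; infer_instance

-- ===== CLAIM (what is proved, stated in full; the proofs are below) =====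
def Claim_equal_exists_set : Prop := ∀ (card_list : List (List Int)), Dom_exists_set card_list → Pre_exists_set card_list → Spec_exists_set card_list (exists_set card_list)

-- ===== LEMMAS AND PROOFS =====

-- the set condition on three cards, written over the same card reads both ports perform
def Good (a b c : List Int) : Prop :=
  (a.getD 0 0 + b.getD 0 0 + c.getD 0 0) % 3 = 0 ∧
  (a.getD 1 0 + b.getD 1 0 + c.getD 1 0) % 3 = 0 ∧
  (a.getD 2 0 + b.getD 2 0 + c.getD 2 0) % 3 = 0 ∧
  (a.getD 3 0 + b.getD 3 0 + c.getD 3 0) % 3 = 0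

theorem pymod3 (x : Int) : PySem.Int.mod x 3 = x % 3 :=
  PySem.Int.mod_eq_emod_of_pos (by norm_num)

theorem isSetA_iff (a b c : List Int) : isSetA a b c = true ↔ Good a b c := by
  simp [isSetA, Good, show List.range 4 = [0,1,2,3] from rfl]

theorem key_iff (a b c : List Int) :
    (keyOf c = needKey (keyOf a) (keyOf b)) ↔ Good a b c := by
  simp only [keyOf, needKey, Good, Prod.mk.injEq, pymod3]
  constructor <;> (rintro ⟨h0, h1, h2, h3⟩; refine ⟨by omega, by omega, by omega, by omega⟩)

theorem Good_rot {a b c : List Int} (h : Good a b c) : Good c a b := by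
  unfold Good at *; omega

theorem Good_swap {a b c : List Int} (h : Good a b c) : Good a c b := by
  unfold Good at *; omega

theorem A_char (cl : List (List Int)) :
    exists_set cl = true ↔ 21 ≤ cl.length ∨
      ∃ i j k, i < j ∧ j < k ∧ k < cl.length ∧
        Good (cl.getD i []) (cl.getD j []) (cl.getD k []) := by
  unfold exists_set
  split_ifs with h
  · simp [h]
  · simp only [List.any_eq_true, List.mem_range, List.mem_range'_1, isSetA_iff]
    constructor
    · rintro ⟨i, hi, j, hj, k, hk, hg⟩
      exact Or.inr ⟨i, j, k, by omega, by omega, by omega, hg⟩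
    · rintro (h21 | ⟨i, j, k, hij, hjk, hk, hg⟩)
      · omega
      · exact ⟨i, by omega, j, by omega, k, by omega, hg⟩

theorem keys_getD (cl : List (List Int)) (i : Nat) (h : i < cl.length) :
    (cl.map keyOf).getD i (0,0,0,0) = keyOf (cl.getD i []) := by
  simp [List.getD_eq_getElem?_getD, h]

theorem altScan_iff (keys : List (Int × Int × Int × Int)) :
    altScan keys = true ↔ ∃ i j k : Nat, i < j ∧ j < keys.length ∧ k < keys.length ∧
      k ≠ i ∧ k ≠ j ∧ keys.getD k (0,0,0,0) = needKey (keys.getD i (0,0,0,0)) (keys.getD j (0,0,0,0)) := by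
  unfold altScan
  simp only [List.any_eq_true, List.mem_range, List.mem_range'_1, PySem.List.mem_enumerate_iff,
    Bool.and_eq_true, beq_iff_eq, decide_eq_true_eq]
  constructor
  · rintro ⟨i, hi, j, hj, x, ⟨k, hk, rfl⟩, ⟨hkey, hki⟩, hkj⟩
    simp only [zero_add] at hkey hki hkj
    refine ⟨i, j, k, by omega, by omega, hk, ?_, ?_, ?_⟩
    · intro h; exact hki (by exact_mod_cast h)
    · intro h; exact hkj (by exact_mod_cast h)
    · simp [List.getD_eq_getElem?_getD, hk, hkey]
  · rintro ⟨i, j, k, hij, hj, hk, hki, hkj, hkey⟩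
    refine ⟨i, by omega, j, by omega, ((0 : Int) + k, keys[k]), ⟨k, hk, rfl⟩, ⟨?_, ?_⟩, ?_⟩
    · rw [← hkey]; simp [List.getD_eq_getElem?_getD, hk]
    · simpa using fun h => hki (by exact_mod_cast h)
    · simpa using fun h => hkj (by exact_mod_cast h)

theorem B_char (cl : List (List Int)) :
    exists_set_alt cl = true ↔ 21 ≤ cl.length ∨
      (¬ cl.length < 3 ∧ ∃ i j k : Nat, i < j ∧ j < cl.length ∧ k < cl.length ∧ k ≠ i ∧ k ≠ j ∧
        keyOf (cl.getD k []) = needKey (keyOf (cl.getD i [])) (keyOf (cl.getD j []))) := by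
  unfold exists_set_alt
  split_ifs with h21 h3
  · simp [h21]
  · simp only [false_iff]
    rintro (h | ⟨hn, -⟩)
    · omega
    · exact hn h3
  · rw [altScan_iff]
    simp only [List.length_map]
    constructor
    · rintro ⟨i, j, k, hij, hj, hk, hki, hkj, hkey⟩
      rw [keys_getD cl i (by omega), keys_getD cl j hj, keys_getD cl k hk] at hkey
      exact Or.inr ⟨h3, i, j, k, hij, hj, hk, hki, hkj, hkey⟩
    · rintro (h | ⟨-, i, j, k, hij, hj, hk, hki, hkj, hkey⟩)
      · omega
      · refine ⟨i, j, k, hij, hj, hk, hki, hkj, ?_⟩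
        rw [keys_getD cl i (by omega), keys_getD cl j hj, keys_getD cl k hk]
        exact hkey

theorem ports_eq (cl : List (List Int)) : exists_set cl = exists_set_alt cl := by
  rw [Bool.eq_iff_iff, A_char, B_char]
  constructor
  · rintro (h | ⟨i, j, k, hij, hjk, hk, hg⟩)
    · exact Or.inl h
    · exact Or.inr ⟨by omega, i, j, k, hij, by omega, hk, by omega, by omega,
        (key_iff _ _ _).mpr hg⟩
  · rintro (h | ⟨h3, i, j, k, hij, hj, hk, hki, hkj, hkey⟩)
    · exact Or.inl h
    · have hg := (key_iff _ _ _).mp hkey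
      rcases Nat.lt_or_ge k i with hlt | hge
      · exact Or.inr ⟨k, i, j, by omega, by omega, by omega, Good_rot hg⟩
      · rcases Nat.lt_or_ge k j with hlt2 | hge2
        · exact Or.inr ⟨i, k, j, by omega, by omega, by omega, Good_swap hg⟩
        · exact Or.inr ⟨i, j, k, by omega, by omega, by omega, hg⟩

-- ===== VERDICT (by name: the statement is the Claim_ definition above) =====
theorem exists_set_spec : Claim_equal_exists_set := by
  intro cl _ _
  unfold Spec_exists_set
  exact ports_eq cl
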